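-- pv_equiv track=rewrite | github.com/joe82512/leetcode | 1365. How Many Numbers Are Smaller Than the Current Number/Solution.py | smallerNumbersThanCurrent_1
-- ===== SOURCE A (Python) =====
-- def smallerNumbersThanCurrent_1(nums):
--     counters, c = {}, 0 # count duplicate
--     counters_sum, c_sum = {}, 0 # count total
--     for sn in sorted(nums):
--         if sn in counters:
--             counters[sn] += 1 #duplicate
--         else:
--             counters[sn] = 1 #first
--         c_sum += 1
--         counters_sum[sn] = c_sum #sum
--
--     return [(counters_sum[n]-counters[n]) for n in nums]
-- ===== SOURCE B (Python) =====
-- def smallerNumbersThanCurrent_1(nums):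
--     return [sum(1 for x in nums if x < n) for n in nums]
-- ===== Notes on version B (the rewrite author's own statement) =====
-- stated objective: simpler
-- what changed: Replaces the sort plus two dictionaries (duplicate counter and cumulative-count table) with a one-line direct count of strictly smaller elements for each position.
import Mathlib
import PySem

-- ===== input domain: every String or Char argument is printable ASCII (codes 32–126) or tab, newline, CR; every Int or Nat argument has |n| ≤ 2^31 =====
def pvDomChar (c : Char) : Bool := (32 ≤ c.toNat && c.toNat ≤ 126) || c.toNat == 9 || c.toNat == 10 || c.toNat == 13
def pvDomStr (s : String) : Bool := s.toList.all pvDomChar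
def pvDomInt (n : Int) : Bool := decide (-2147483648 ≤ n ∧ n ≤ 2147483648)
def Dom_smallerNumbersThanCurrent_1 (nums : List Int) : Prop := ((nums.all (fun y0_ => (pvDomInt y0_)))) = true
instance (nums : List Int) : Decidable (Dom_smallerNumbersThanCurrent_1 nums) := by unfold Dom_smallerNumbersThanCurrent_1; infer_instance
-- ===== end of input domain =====

-- B drops A's sort plus two dictionaries and counts the strictly smaller elements directly (simpler; no speed claim).

-- ===== PORT A =====
-- one step of A's 'for sn in sorted(nums)' loop; state = (counters, c, counters_sum, c_sum)
def pvStepA (acc : PySem.Dict Int Int × Int × PySem.Dict Int Int × Int) (sn : Int) :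
    PySem.Dict Int Int × Int × PySem.Dict Int Int × Int :=
  let counters := if acc.1.contains sn
    then acc.1.insert sn (acc.1.getD sn 0 + 1)   -- counters[sn] += 1
    else acc.1.insert sn 1                       -- counters[sn] = 1
  let c_sum := acc.2.2.2 + 1
  let counters_sum := acc.2.2.1.insert sn c_sum
  (counters, acc.2.1, counters_sum, c_sum)

def smallerNumbersThanCurrent_1 (nums : List Int) : List Int :=
  let st := (PySem.List.sorted nums (fun x => x) false).foldl pvStepA
    (PySem.Dict.empty, (0 : Int), PySem.Dict.empty, (0 : Int))
  -- counters_sum[n] / counters[n]: every n ∈ nums is a key (it was inserted during the loop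
  -- over sorted(nums)), so the lookups never raise; getD 0 is exact here.
  nums.map (fun n => st.2.2.1.getD n 0 - st.1.getD n 0)

-- ===== PORT B =====
def smallerNumbersThanCurrent_1_alt (nums : List Int) : List Int :=
  -- [sum(1 for x in nums if x < n) for n in nums]
  nums.map (fun n => ((nums.filter (fun x => decide (x < n))).map (fun _ => (1 : Int))).sum)

-- ===== PRECONDITION & SPEC =====
def Spec_smallerNumbersThanCurrent_1 (nums : List Int) (out : List Int) : Prop := out = smallerNumbersThanCurrent_1_alt nums
instance (nums : List Int) (out : List Int) : Decidable (Spec_smallerNumbersThanCurrent_1 nums out) := by unfold Spec_smallerNumbersThanCurrent_1; infer_instance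

-- ===== CLAIM (what is proved, stated in full; the proofs are below) =====
def Claim_equal_smallerNumbersThanCurrent_1 : Prop := ∀ (nums : List Int), Dom_smallerNumbersThanCurrent_1 nums → Spec_smallerNumbersThanCurrent_1 nums (smallerNumbersThanCurrent_1 nums)

-- ===== LEMMAS AND PROOFS =====

-- Invariant of A's loop over a prefix p of the sorted list:
-- counters counts every key, counters_sum holds (#elements ≤ k) for each processed key k, c_sum = |p|.
theorem pvLoopA_invariant (p : List Int) (hp : p.Pairwise (· ≤ ·)) :
    (∀ k : Int, ((p.foldl pvStepA (PySem.Dict.empty, (0 : Int), PySem.Dict.empty, (0 : Int))).1.getD k 0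
        = (p.count k : Int)))
    ∧ (p.foldl pvStepA (PySem.Dict.empty, (0 : Int), PySem.Dict.empty, (0 : Int))).2.2.2 = (p.length : Int)
    ∧ (∀ k ∈ p, (p.foldl pvStepA (PySem.Dict.empty, (0 : Int), PySem.Dict.empty, (0 : Int))).2.2.1.getD k 0
        = (p.countP (fun x => decide (x ≤ k)) : Int)) := by
  induction p using List.reverseRecOn with
  | nil => simp
  | append_singleton p x ih =>
      rw [List.pairwise_append] at hp
      obtain ⟨hp', -, hle⟩ := hp
      obtain ⟨ihc, ihlen, ihsum⟩ := ih hp'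
      rw [List.foldl_append]
      simp only [List.foldl_cons, List.foldl_nil]
      set st := p.foldl pvStepA (PySem.Dict.empty, (0 : Int), PySem.Dict.empty, (0 : Int)) with hst
      refine ⟨?_, ?_, ?_⟩
      · intro k
        have hcnt : (pvStepA st x).1.getD k 0 = if k = x then st.1.getD x 0 + 1 else st.1.getD k 0 := by
          by_cases h : st.1.contains x = true
          · simp [pvStepA, h, PySem.Dict.getD_insert]
          · have h0 : st.1.getD x 0 = 0 :=
              PySem.Dict.getD_of_not_contains st.1 0 (by simpa using h)
            simp [pvStepA, h, PySem.Dict.getD_insert, h0]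
        rw [hcnt, ihc k, List.count_append]
        by_cases hk : k = x
        · simp [hk, ihc x]
        · simp [hk, Ne.symm hk]
      · simp [pvStepA, ihlen]
      · intro k hk
        have hsum : (pvStepA st x).2.2.1.getD k 0 = if k = x then st.2.2.2 + 1 else st.2.2.1.getD k 0 := by
          simp [pvStepA, PySem.Dict.getD_insert]
        rw [hsum]
        by_cases hkx : k = x
        · subst hkx
          have hall : p.countP (fun y => decide (y ≤ k)) = p.length :=
            List.countP_eq_length.mpr (fun y hy => by simpa using hle y hy)
          simp [ihlen, List.countP_append, hall]
        · have hkp : k ∈ p := by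
            rcases List.mem_append.mp hk with h | h
            · exact h
            · simp at h; exact absurd h hkx
          have hxk : ¬ x ≤ k := by
            intro hxk
            exact hkx (le_antisymm (hle k hkp x (by simp)) hxk)
          rw [if_neg hkx, ihsum k hkp, List.countP_append]
          simp [hxk]

-- #{x : x ≤ n} = #{x : x < n} + #{x : x = n}
theorem pvCountP_le_split (p : List Int) (n : Int) :
    p.countP (fun x => decide (x ≤ n))
      = p.countP (fun x => decide (x < n)) + p.count n := by
  induction p with
  | nil => simp
  | cons a t ih =>
      simp only [List.countP_cons, List.count_cons, ih]
      by_cases h2 : a = n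
      · subst h2; simp; omega
      · by_cases h1 : a ≤ n
        · simp [h1, lt_of_le_of_ne h1 h2, h2]; omega
        · simp [h1, h2]; omega

theorem smallerNumbersThanCurrent_1_eq (nums : List Int) :
    smallerNumbersThanCurrent_1 nums = smallerNumbersThanCurrent_1_alt nums := by
  unfold smallerNumbersThanCurrent_1 smallerNumbersThanCurrent_1_alt
  apply List.map_congr_left
  intro n hn
  set s := PySem.List.sorted nums (fun x => x) false with hs
  have hperm : s.Perm nums := PySem.List.sorted_perm nums (fun x => x) false
  obtain ⟨ihc, -, ihsum⟩ := pvLoopA_invariant s (PySem.List.sorted_pairwise nums (fun x => x))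
  have hns : n ∈ s := hperm.mem_iff.mpr hn
  rw [ihc n, ihsum n hns, pvCountP_le_split]
  have h1 : s.countP (fun x => decide (x < n)) = nums.countP (fun x => decide (x < n)) :=
    hperm.countP_eq _
  have h2 : (nums.filter (fun x => decide (x < n))).map (fun _ => (1 : Int))
      = List.replicate (nums.countP (fun x => decide (x < n))) (1 : Int) := by
    simp [List.countP_eq_length_filter]
  rw [h2, h1]
  simp [List.countP_eq_length_filter]

-- ===== VERDICT (by name: the statement is the Claim_ definition above) =====
theorem smallerNumbersThanCurrent_1_spec : Claim_equal_smallerNumbersThanCurrent_1 := by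
  intro nums _
  unfold Spec_smallerNumbersThanCurrent_1
  exact smallerNumbersThanCurrent_1_eq nums
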